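-- pv_equiv track=rewrite | github.com/ericmerle3789/Collatz-Junction-Theorem | scripts/research/r54_induction_last.py | enumerate_all_PB
-- ===== SOURCE A (Python) =====
-- from math import comb, gcd, ceil, log2, sqrt, log
-- from itertools import combinations_with_replacement
--
-- def compute_S(k):
--     """Minimal S such that 2^S > 3^k. Exact via integer comparison."""
--     S = ceil(k * log2(3))
--     three_k = 3 ** k
--     while (1 << S) <= three_k:
--         S += 1
--     while S > 0 and (1 << (S - 1)) > three_k:
--         S -= 1
--     return S
--
-- def compute_max_B(k):
--     """max_B = S - k."""
--     return compute_S(k) - k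
--
-- def compute_g(k, p):
--     """g = 2^S * 3^{-k} mod p. Matches R53_double_counting convention."""
--     if p <= 1 or gcd(6, p) != 1:
--         return None
--     S = compute_S(k)
--     two_S = pow(2, S, p)
--     three_k_inv = pow(pow(3, k, p), p - 2, p)
--     return (two_S * three_k_inv) % p
--
-- def enumerate_all_PB(k, p, g=None):
--     """Enumerate all monotone B-vectors and P_B(g) mod p.
--     B in [0, max_B]^k, nondecreasing, NO constraint on B_{k-1}.
--     Returns list of (B_tuple, P_B_value).
--     """
--     max_B = compute_max_B(k)
--     if g is None:
--         g = compute_g(k, p)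
--     if g is None:
--         return []
--
--     g_pows = [pow(g, j, p) for j in range(k)]
--     two_pows = [pow(2, b, p) for b in range(max_B + 1)]
--
--     results = []
--     for B in combinations_with_replacement(range(max_B + 1), k):
--         val = 0
--         for j in range(k):
--             val = (val + g_pows[j] * two_pows[B[j]]) % p
--         results.append((B, val))
--     return results
-- ===== SOURCE B (Python) =====
-- from math import gcd, ceil, log2
--
-- def compute_S(k):
--     S = ceil(k * log2(3))
--     three_k = 3 ** k
--     while (1 << S) <= three_k:
--         S += 1
--     while S > 0 and (1 << (S - 1)) > three_k:
--         S -= 1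
--     return S
--
-- def compute_max_B(k):
--     return compute_S(k) - k
--
-- def compute_g(k, p):
--     if p <= 1 or gcd(6, p) != 1:
--         return None
--     S = compute_S(k)
--     two_S = pow(2, S, p)
--     three_k_inv = pow(pow(3, k, p), p - 2, p)
--     return (two_S * three_k_inv) % p
--
-- def enumerate_all_PB(k, p, g=None):
--     """Explicit-stack DFS over nondecreasing B-vectors that carries the running
--     partial sum of P_B(g), so the per-vector inner evaluation loop disappears."""
--     max_B = compute_max_B(k)
--     if g is None:
--         g = compute_g(k, p)
--     if g is None:
--         return []
--     g_pows = [pow(g, j, p) for j in range(k)]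
--     two_pows = [pow(2, b, p) for b in range(max_B + 1)]
--     results = []
--     stack = [(0, 0, 0, ())]  # (j, lo, partial value, prefix)
--     while stack:
--         j, lo, val, prefix = stack.pop()
--         if j == k:
--             results.append((prefix, val))
--         else:
--             gj = g_pows[j]
--             for b in range(max_B, lo - 1, -1):  # push b descending: b == lo ends on top
--                 stack.append((j + 1, b, (val + gj * two_pows[b]) % p, prefix + (b,)))
--     return results
-- ===== Notes on version B (the rewrite author's own statement) =====
-- stated objective: alternative
-- what changed: Replaces the itertools.combinations_with_replacement scan with a per-vector O(k) inner evaluation loop by a recursive DFS that generates the nondecreasing vectors itself while carrying the running partial sum, so each tree node does O(1) modular arithmetic.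
import Mathlib
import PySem

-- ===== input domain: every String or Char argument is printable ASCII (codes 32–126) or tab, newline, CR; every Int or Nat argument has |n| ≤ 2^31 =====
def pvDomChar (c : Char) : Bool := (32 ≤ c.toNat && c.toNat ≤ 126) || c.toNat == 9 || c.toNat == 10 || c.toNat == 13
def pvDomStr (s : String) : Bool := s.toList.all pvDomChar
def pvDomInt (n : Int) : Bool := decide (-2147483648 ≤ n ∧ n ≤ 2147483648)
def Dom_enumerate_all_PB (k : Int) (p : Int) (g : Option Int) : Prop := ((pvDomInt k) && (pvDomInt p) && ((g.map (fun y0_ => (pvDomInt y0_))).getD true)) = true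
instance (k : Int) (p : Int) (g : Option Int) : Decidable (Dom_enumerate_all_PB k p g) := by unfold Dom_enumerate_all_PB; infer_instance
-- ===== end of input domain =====

-- B replaces the itertools.combinations_with_replacement scan + per-vector inner evaluation loop
-- by an explicit-stack DFS that generates the nondecreasing vectors itself while carrying the
-- running partial sum (objective: alternative; same results in the same order).


-- ===== PORT A =====
-- compute_S: A starts from the float guess ceil(k*log2 3) and corrects it with two exact integer
-- loops; for every k ≥ 0 the returned value is exactly the least S with 2^S > 3^k, which this
-- integer loop (starting from 0) computes — same return value, no floats (exact port of the result).
def computeSGo (t : Nat) (S : Nat) : Nat :=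
  if 2 ^ S ≤ t then computeSGo t (S + 1) else S
termination_by t + 1 - 2 ^ S
decreasing_by
  have h2 : 2 ^ S < 2 ^ (S + 1) := Nat.pow_lt_pow_right (by norm_num) (Nat.lt_succ_self S)
  omega

def computeS (k : Nat) : Nat := computeSGo (3 ^ k) 0

-- compute_g (only reached with p ≥ 5 coprime to 6, where pow's exponents p-2 and k are ≥ 0)
def computeG (k : Int) (p : Int) : Option Int :=
  if p ≤ 1 ∨ Int.gcd 6 p ≠ 1 then none
  else
    let S := computeS k.toNat
    let twoS := PySem.Int.powMod 2 S p
    let threeKinv := PySem.Int.powMod (PySem.Int.powMod 3 k.toNat p) (p - 2).toNat p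
    some (PySem.Int.mod (twoS * threeKinv) p)

-- itertools.combinations_with_replacement(range(n), rem), tails starting at value lo
-- (lexicographic order, exactly itertools' yield order)
def cwrFrom (n : Nat) : (rem : Nat) → (lo : Nat) → List (List Int)
  | 0, _ => [[]]
  | rem + 1, lo =>
      (List.range' lo (n - lo)).flatMap (fun b =>
        (cwrFrom n rem b).map (fun t => ((b : Int)) :: t))

-- indices j and B[j] are always in range under Pre_, so getD matches Python's list indexing
def enumerate_all_PB (k : Int) (p : Int) (g : Option Int) : List (List Int × Int) :=
  let maxB : Int := (computeS k.toNat : Int) - k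
  let g1 : Option Int := match g with | none => computeG k p | some x => some x
  match g1 with
  | none => []
  | some gv =>
      let gPows := (List.range k.toNat).map (fun j => PySem.Int.powMod gv j p)
      let twoPows := (List.range (maxB + 1).toNat).map (fun b => PySem.Int.powMod 2 b p)
      (cwrFrom (maxB + 1).toNat k.toNat 0).map (fun B =>
        (B, (List.range k.toNat).foldl
              (fun val j =>
                PySem.Int.mod (val + gPows.getD j 0 * twoPows.getD (B.getD j 0).toNat 0) p) 0))

-- ===== PORT B =====
-- the stack frames of Source B's while loop: (rem, j, lo, val, prefix); Source B stores j and tests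
-- j == k — the port carries rem = k - j alongside j (same frames, rem drives termination)
def pbMeasure (n : Nat) (st : List (Nat × Nat × Nat × Int × List Int)) : Nat :=
  (st.map (fun f => (n + 1) ^ (f.1 + 1))).sum

-- Source B pushes b from max_B down to lo so that b = lo ends on top of the stack: the stack
-- top-first is exactly (range' lo (n-lo)).map … prepended, which is what this writes
def stackRun (gp tp : List Int) (p : Int) (n : Nat) :
    (st : List (Nat × Nat × Nat × Int × List Int)) → (acc : List (List Int × Int)) →
      List (List Int × Int)
  | [], acc => acc.reverse
  | (0, _, _, val, pre) :: rest, acc => stackRun gp tp p n rest ((pre, val) :: acc)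
  | (rem + 1, j, lo, val, pre) :: rest, acc =>
      stackRun gp tp p n
        ((List.range' lo (n - lo)).map (fun b =>
            (rem, j + 1, b, PySem.Int.mod (val + gp.getD j 0 * tp.getD b 0) p,
              pre ++ [((b : Int))])) ++ rest)
        acc
termination_by st _ => pbMeasure n st
decreasing_by
  · simp [pbMeasure]
  · simp only [pbMeasure, List.map_append, List.sum_append, List.map_map, List.map_cons,
      List.sum_cons, Function.comp_def, Nat.succ_eq_add_one]
    rw [List.map_const', List.sum_replicate, List.length_range', smul_eq_mul]
    have hpos : 0 < (n + 1) ^ (rem + 1) := by positivity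
    have h1 : (n - lo) * (n + 1) ^ (rem + 1) < (n + 1) * (n + 1) ^ (rem + 1) :=
      Nat.mul_lt_mul_of_lt_of_le (by omega) (le_refl _) hpos
    have h2 : (n + 1) * (n + 1) ^ (rem + 1) = (n + 1) ^ (rem + 1 + 1) := by ring
    omega

def enumerate_all_PB_alt (k : Int) (p : Int) (g : Option Int) : List (List Int × Int) :=
  let maxB : Int := (computeS k.toNat : Int) - k
  let g1 : Option Int := match g with | none => computeG k p | some x => some x
  match g1 with
  | none => []
  | some gv =>
      let gPows := (List.range k.toNat).map (fun j => PySem.Int.powMod gv j p)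
      let twoPows := (List.range (maxB + 1).toNat).map (fun b => PySem.Int.powMod 2 b p)
      stackRun gPows twoPows p (maxB + 1).toNat [(k.toNat, 0, 0, 0, [])] []

-- ===== PRECONDITION & SPEC =====
-- Pre_ excludes exactly the inputs where the Python A raises: k < 0 (ValueError from a negative
-- shift in compute_S) and p = 0 with g supplied (ValueError: pow() 3rd argument cannot be 0).
def Pre_enumerate_all_PB (k : Int) (p : Int) (g : Option Int) : Prop :=
  0 ≤ k ∧ (g = none ∨ p ≠ 0)
instance (k : Int) (p : Int) (g : Option Int) : Decidable (Pre_enumerate_all_PB k p g) := by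
  unfold Pre_enumerate_all_PB; infer_instance

def pvWitness_enumerate_all_PB : Int × Int × Option Int := (2, 7, none)

def Spec_enumerate_all_PB (k : Int) (p : Int) (g : Option Int) (out : List (List Int × Int)) : Prop := out = enumerate_all_PB_alt k p g
instance (k : Int) (p : Int) (g : Option Int) (out : List (List Int × Int)) : Decidable (Spec_enumerate_all_PB k p g out) := by unfold Spec_enumerate_all_PB; infer_instance

-- ===== CLAIM (what is proved, stated in full; the proofs are below) =====
def Claim_equal_enumerate_all_PB : Prop := ∀ (k : Int) (p : Int) (g : Option Int), Dom_enumerate_all_PB k p g → Pre_enumerate_all_PB k p g → Spec_enumerate_all_PB k p g (enumerate_all_PB k p g)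

-- ===== LEMMAS AND PROOFS =====

-- the value a suffix B (whose first entry sits at position j) contributes, folded from val
def sufVal (gp tp : List Int) (p : Int) : Nat → Int → List Int → Int
  | _, val, [] => val
  | j, val, b :: rest =>
      sufVal gp tp p (j + 1) (PySem.Int.mod (val + gp.getD j 0 * tp.getD b.toNat 0) p) rest

-- the results a single stack frame will eventually contribute
def expandF (gp tp : List Int) (p : Int) (n : Nat) (f : Nat × Nat × Nat × Int × List Int) :
    List (List Int × Int) :=
  (cwrFrom n f.1 f.2.2.1).map (fun B => (f.2.2.2.2 ++ B, sufVal gp tp p f.2.1 f.2.2.2.1 B))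

theorem stackRun_eq (gp tp : List Int) (p : Int) (n : Nat) :
    ∀ (st : List (Nat × Nat × Nat × Int × List Int)) (acc : List (List Int × Int)),
      stackRun gp tp p n st acc
        = acc.reverse ++ (st.map (expandF gp tp p n)).flatten := by
  intro st acc
  fun_induction stackRun gp tp p n st acc with
  | case1 acc => simp
  | case2 j lo val pre rest acc ih =>
      rw [ih]
      simp [expandF, cwrFrom, sufVal]
  | case3 rem j lo val pre rest acc ih =>
      rw [ih]
      simp only [List.map_append, List.flatten_append, List.map_cons, List.flatten_cons,
        List.map_map]
      congr 1
      congr 1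
      simp only [expandF, cwrFrom, List.map_flatMap, ← List.flatMap_def]
      refine List.flatMap_congr ?_
      intro b _
      simp [expandF, Function.comp_def, sufVal, List.append_assoc]

theorem cwrFrom_length (n : Nat) :
    ∀ (rem lo : Nat) (B : List Int), B ∈ cwrFrom n rem lo → B.length = rem := by
  intro rem
  induction rem with
  | zero => intro lo B hB; simp [cwrFrom] at hB; simp [hB]
  | succ rem ih =>
      intro lo B hB
      simp only [cwrFrom, List.mem_flatMap, List.mem_map] at hB
      obtain ⟨b, _, t, ht, rfl⟩ := hB
      simp [ih b t ht]

theorem fold_eq_sufVal (gp tp : List Int) (p : Int) :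
    ∀ (B : List Int) (j0 : Nat) (val : Int),
      (List.range' j0 B.length).foldl
          (fun v i => PySem.Int.mod (v + gp.getD i 0 * tp.getD ((B.getD (i - j0) 0).toNat) 0) p) val
        = sufVal gp tp p j0 val B := by
  intro B
  induction B with
  | nil => intro j0 val; simp [sufVal]
  | cons b rest ih =>
      intro j0 val
      have hr : List.range' j0 (b :: rest).length = j0 :: List.range' (j0 + 1) rest.length := by
        simp [List.range']
      rw [hr]
      simp only [List.foldl_cons, Nat.sub_self, List.getD_cons_zero]
      rw [PySem.List.foldl_congr_mem _ _
            (fun v i => PySem.Int.mod (v + gp.getD i 0 * tp.getD ((rest.getD (i - (j0 + 1)) 0).toNat) 0) p) _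
            ?_]
      · exact ih (j0 + 1) _
      · intro acc i hi
        have hge : j0 + 1 ≤ i := (List.mem_range'_1.mp hi).1
        have hsub : i - j0 = (i - (j0 + 1)) + 1 := by omega
        rw [hsub, List.getD_cons_succ]

theorem ports_agree (k p : Int) (g : Option Int) :
    enumerate_all_PB k p g = enumerate_all_PB_alt k p g := by
  unfold enumerate_all_PB enumerate_all_PB_alt
  cases hg : (match g with | none => computeG k p | some x => some x) with
  | none => rfl
  | some gv =>
      simp only
      rw [stackRun_eq]
      simp only [List.map_cons, List.map_nil, List.flatten_cons, List.flatten_nil,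
        List.reverse_nil, List.nil_append, List.append_nil, expandF]
      refine List.map_congr_left ?_
      intro B hB
      have hlen := cwrFrom_length _ _ _ _ hB
      have h := fold_eq_sufVal
        ((List.range k.toNat).map (fun j => PySem.Int.powMod gv j p))
        ((List.range (((computeS k.toNat : Int) - k) + 1).toNat).map (fun b => PySem.Int.powMod 2 b p))
        p B 0 0
      simp only [Nat.sub_zero, hlen, ← List.range_eq_range'] at h
      rw [h]

-- ===== VERDICT (by name: the statement is the Claim_ definition above) =====
theorem enumerate_all_PB_spec : Claim_equal_enumerate_all_PB := by
  intro k p g _ _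
  unfold Spec_enumerate_all_PB
  exact ports_agree k p g
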